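-- pv_equiv track=rewrite | github.com/Vaujx/BAAC | App.py | format_response_html
-- ===== SOURCE A (Python) =====
-- def format_response_html(text):
--     # Replace markdown bullet points (* Item) with HTML list items
--     if '*' in text:
--         # Check if the text contains bullet points
--         lines = text.split('\n')
--         in_list = False
--         formatted_lines = []
--
--         for line in lines:
--             line = line.strip()
--             if line.startswith('*'):
--                 if not in_list:
--                     # Start a new list
--                     formatted_lines.append('<ul class="list-disc pl-5 space-y-2">')
--                     in_list = True
--                 # Convert the bullet point to an HTML list item with styling
--                 item_text = line[1:].strip()
--                 formatted_lines.append(f'<li class="text-base">{item_text}</li>')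
--             else:
--                 if in_list:
--                     # Close the list
--                     formatted_lines.append('</ul>')
--                     in_list = False
--                 formatted_lines.append(line)
--
--         if in_list:
--             # Close the list if it's still open
--             formatted_lines.append('</ul>')
--
--         return '\n'.join(formatted_lines)
--
--     # If no bullet points, return the original text
--     return text
-- ===== SOURCE B (Python) =====
-- def format_response_html(text):
--     # Group consecutive stripped lines into bullet/non-bullet runs, then render each run.
--     if '*' not in text:
--         return text
--     stripped = [ln.strip() for ln in text.split('\n')]
--     n = len(stripped)
--     out = []
--     i = 0
--     while i < n:
--         is_bullet = stripped[i].startswith('*')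
--         j = i
--         while j < n and stripped[j].startswith('*') == is_bullet:
--             j += 1
--         run = stripped[i:j]
--         if is_bullet:
--             out.append('<ul class="list-disc pl-5 space-y-2">')
--             for s in run:
--                 out.append(f'<li class="text-base">{s[1:].strip()}</li>')
--             out.append('</ul>')
--         else:
--             out.extend(run)
--         i = j
--     return '\n'.join(out)
-- ===== Notes on version B (the rewrite author's own statement) =====
-- stated objective: alternative
-- what changed: Replaces A's incremental in_list boolean state machine with a two-phase decomposition: strip all lines first, then scan maximal runs of consecutive bullet/non-bullet lines and render each run as a whole (<ul>...</ul> around a bullet run, verbatim otherwise).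
import Mathlib
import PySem

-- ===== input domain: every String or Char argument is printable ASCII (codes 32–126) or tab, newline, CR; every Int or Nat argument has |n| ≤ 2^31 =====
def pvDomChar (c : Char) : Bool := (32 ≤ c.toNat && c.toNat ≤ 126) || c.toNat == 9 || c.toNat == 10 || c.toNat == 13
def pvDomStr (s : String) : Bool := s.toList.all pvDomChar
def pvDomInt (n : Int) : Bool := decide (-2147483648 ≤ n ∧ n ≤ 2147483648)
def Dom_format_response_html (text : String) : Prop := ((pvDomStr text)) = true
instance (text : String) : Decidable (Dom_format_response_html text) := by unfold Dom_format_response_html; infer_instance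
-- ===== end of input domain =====

-- B replaces A's incremental in_list state flag by grouping consecutive stripped lines into
-- maximal bullet/non-bullet runs and rendering each run (objective: alternative decomposition).

-- shared literal tags
def ulOpen : String := "<ul class=\"list-disc pl-5 space-y-2\">"
def ulClose : String := "</ul>"
def liTag (item : String) : String := "<li class=\"text-base\">" ++ item ++ "</li>"

-- ===== PORT A =====
-- the body of A's `for line in lines` loop, state = (in_list, formatted_lines)
def stepA (st : Bool × List String) (line0 : String) : Bool × List String :=
  let line := PySem.Str.strip line0
  if PySem.Str.startswith line "*" then
    let fl := if st.1 then st.2 else st.2 ++ [ulOpen]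
    let item := PySem.Str.strip (PySem.Str.slice line (some 1) none)
    (true, fl ++ [liTag item])
  else
    let fl := if st.1 then st.2 ++ [ulClose] else st.2
    (false, fl ++ [line])

def format_response_html (text : String) : String :=
  if PySem.Str.isIn "*" text then
    let lines := (PySem.Str.split? text "\n").getD []   -- sep "\n" ≠ "", so split? is always `some`
    let res := lines.foldl stepA (false, [])
    if res.1 then PySem.Str.join "\n" (res.2 ++ [ulClose]) else PySem.Str.join "\n" res.2
  else text

-- ===== PORT B =====
-- <li …> for an (already stripped) bullet line s
def liItem (s : String) : String := liTag (PySem.Str.strip (PySem.Str.slice s (some 1) none))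

-- B's outer loop: take the maximal run sharing the head line's bullet flag, render it, recurse
def renderGroups (l : List String) : List String :=
  match l with
  | [] => []
  | s :: rest =>
    let k := PySem.Str.startswith s "*"
    let run := rest.takeWhile (fun t => PySem.Str.startswith t "*" == k)
    let rest' := rest.dropWhile (fun t => PySem.Str.startswith t "*" == k)
    (if k then ulOpen :: (s :: run).map liItem ++ [ulClose] else s :: run) ++ renderGroups rest'
termination_by l.length
decreasing_by
  simp only [List.length_cons]
  exact Nat.lt_succ_of_le (List.length_dropWhile_le _ _)

def format_response_html_alt (text : String) : String :=
  if PySem.Str.isIn "*" text then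
    PySem.Str.join "\n" (renderGroups (((PySem.Str.split? text "\n").getD []).map PySem.Str.strip))
  else text

-- ===== PRECONDITION & SPEC =====
def Spec_format_response_html (text : String) (out : String) : Prop := out = format_response_html_alt text
instance (text : String) (out : String) : Decidable (Spec_format_response_html text out) := by unfold Spec_format_response_html; infer_instance

-- ===== CLAIM (what is proved, stated in full; the proofs are below) =====
def Claim_equal_format_response_html : Prop := ∀ (text : String), Dom_format_response_html text → Spec_format_response_html text (format_response_html text)

-- ===== LEMMAS AND PROOFS =====

-- A's loop followed by the final close, written as one structural recursion over stripped lines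
def Rgo (b : Bool) : List String → List String
  | [] => if b then [ulClose] else []
  | s :: ls =>
    if PySem.Str.startswith s "*" then
      (if b then [] else [ulOpen]) ++ liItem s :: Rgo true ls
    else
      (if b then [ulClose] else []) ++ s :: Rgo false ls

def finalizeA (r : Bool × List String) : List String := if r.1 then r.2 ++ [ulClose] else r.2

lemma stepA_pos (st : Bool × List String) (l : String)
    (h : PySem.Str.startswith (PySem.Str.strip l) "*" = true) :
    stepA st l = (true, (if st.1 then st.2 else st.2 ++ [ulOpen]) ++ [liItem (PySem.Str.strip l)]) := by
  simp only [stepA, liItem]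
  rw [if_pos h]

lemma stepA_neg (st : Bool × List String) (l : String)
    (h : ¬ PySem.Str.startswith (PySem.Str.strip l) "*" = true) :
    stepA st l = (false, (if st.1 then st.2 ++ [ulClose] else st.2) ++ [PySem.Str.strip l]) := by
  simp only [stepA]
  rw [if_neg h]

lemma foldl_eq_Rgo (ls : List String) : ∀ (b : Bool) (acc : List String),
    finalizeA (ls.foldl stepA (b, acc)) = acc ++ Rgo b (ls.map PySem.Str.strip) := by
  induction ls with
  | nil =>
    intro b acc
    cases b <;> simp only [List.foldl_nil, List.map_nil, Rgo, finalizeA] <;> simp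
  | cons l ls ih =>
    intro b acc
    simp only [List.foldl_cons, List.map_cons]
    by_cases h : PySem.Str.startswith (PySem.Str.strip l) "*" = true
    · rw [stepA_pos _ _ h]
      simp only [ih]
      simp only [Rgo]
      rw [if_pos h]
      cases b <;> simp
    · rw [stepA_neg _ _ h]
      simp only [ih]
      simp only [Rgo]
      rw [if_neg h]
      cases b <;> simp

-- a run of bullet lines inside an open list: one <li> each
lemma Rgo_true_append (run : List String) (rest : List String)
    (h : ∀ t ∈ run, PySem.Str.startswith t "*" = true) :
    Rgo true (run ++ rest) = run.map liItem ++ Rgo true rest := by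
  induction run with
  | nil => simp
  | cons s tl ih =>
    have hs := h s (by simp)
    simp only [List.cons_append, Rgo, List.map_cons]
    rw [if_pos hs]
    simp [ih (fun t ht => h t (by simp [ht]))]

-- a run of non-bullet lines outside a list: copied verbatim
lemma Rgo_false_append (run : List String) (rest : List String)
    (h : ∀ t ∈ run, PySem.Str.startswith t "*" = false) :
    Rgo false (run ++ rest) = run ++ Rgo false rest := by
  induction run with
  | nil => simp
  | cons s tl ih =>
    have hs := h s (by simp)
    simp only [List.cons_append, Rgo]
    rw [if_neg (by rw [hs]; simp)]
    simp [ih (fun t ht => h t (by simp [ht]))]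

-- closing the list is legal whenever the next line (if any) is not a bullet
lemma Rgo_true_close (rest : List String)
    (h : rest = [] ∨ ∃ s tl, rest = s :: tl ∧ PySem.Str.startswith s "*" = false) :
    Rgo true rest = ulClose :: Rgo false rest := by
  rcases h with h | ⟨s, tl, rfl, hs⟩
  · subst h; simp [Rgo]
  · have hneg : ¬ PySem.Str.startswith s "*" = true := by rw [hs]; simp
    simp only [Rgo, if_neg hneg]
    simp

lemma dropWhile_head_false {α : Type} (p : α → Bool) (l : List α) :
    l.dropWhile p = [] ∨ ∃ s tl, l.dropWhile p = s :: tl ∧ p s = false := by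
  rcases hd : l.dropWhile p with _ | ⟨s, tl⟩
  · exact Or.inl rfl
  · refine Or.inr ⟨s, tl, rfl, ?_⟩
    have := List.head_dropWhile_not p (l := l) (by simp [hd])
    simpa [hd] using this

lemma renderGroups_eq_Rgo_aux : ∀ (n : Nat) (m : List String), m.length ≤ n →
    renderGroups m = Rgo false m := by
  intro n
  induction n with
  | zero =>
    intro m hm
    have : m = [] := List.length_eq_zero_iff.mp (Nat.le_zero.mp hm)
    subst this
    simp [renderGroups, Rgo]
  | succ n ih =>
    intro m hm
    cases m with
    | nil => simp [renderGroups, Rgo]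
    | cons s rest =>
      have hrl : rest.length ≤ n := by simpa using hm
      by_cases hkv : PySem.Str.startswith s "*" = true
      · simp only [renderGroups, hkv, beq_true, if_true]
        have hrun : ∀ t ∈ rest.takeWhile (fun t => PySem.Str.startswith t "*"),
            PySem.Str.startswith t "*" = true :=
          fun t ht => List.mem_takeWhile_imp (p := fun t => PySem.Str.startswith t "*") ht
        have hih := ih (rest.dropWhile (fun t => PySem.Str.startswith t "*"))
          (le_trans (List.length_dropWhile_le _ _) hrl)
        have hclose : Rgo true (rest.dropWhile (fun t => PySem.Str.startswith t "*"))
            = ulClose :: Rgo false (rest.dropWhile (fun t => PySem.Str.startswith t "*")) := by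
          apply Rgo_true_close
          rcases dropWhile_head_false (fun t => PySem.Str.startswith t "*") rest with h | ⟨s', tl, heq, hps⟩
          · exact Or.inl h
          · exact Or.inr ⟨s', tl, heq, hps⟩
        have hR : Rgo false (s :: rest) = ulOpen :: liItem s ::
            ((rest.takeWhile (fun t => PySem.Str.startswith t "*")).map liItem
              ++ Rgo true (rest.dropWhile (fun t => PySem.Str.startswith t "*"))) := by
          conv_lhs => rw [show rest = rest.takeWhile (fun t => PySem.Str.startswith t "*")
            ++ rest.dropWhile (fun t => PySem.Str.startswith t "*")
            from (List.takeWhile_append_dropWhile).symm]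
          simp only [Rgo]
          rw [if_pos hkv, Rgo_true_append _ _ hrun]
          simp
        rw [hih, hR, hclose]
        simp
      · have hkf : PySem.Str.startswith s "*" = false := by
          cases hb : PySem.Str.startswith s "*"
          · rfl
          · exact absurd hb hkv
        simp only [renderGroups, hkf, beq_false]
        have hrun : ∀ t ∈ rest.takeWhile (fun t => !PySem.Str.startswith t "*"),
            PySem.Str.startswith t "*" = false := by
          intro t ht
          have := List.mem_takeWhile_imp (p := fun t => !PySem.Str.startswith t "*") ht
          simpa using this
        have hih := ih (rest.dropWhile (fun t => !PySem.Str.startswith t "*"))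
          (le_trans (List.length_dropWhile_le _ _) hrl)
        have hR : Rgo false (s :: rest) = s ::
            (rest.takeWhile (fun t => !PySem.Str.startswith t "*")
              ++ Rgo false (rest.dropWhile (fun t => !PySem.Str.startswith t "*"))) := by
          conv_lhs => rw [show rest = rest.takeWhile (fun t => !PySem.Str.startswith t "*")
            ++ rest.dropWhile (fun t => !PySem.Str.startswith t "*")
            from (List.takeWhile_append_dropWhile).symm]
          simp only [Rgo]
          rw [if_neg hkv, Rgo_false_append _ _ hrun]
          simp
        rw [hih, hR]
        simp

lemma renderGroups_eq_Rgo (m : List String) : renderGroups m = Rgo false m :=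
  renderGroups_eq_Rgo_aux m.length m le_rfl

-- ===== VERDICT (by name: the statement is the Claim_ definition above) =====
theorem format_response_html_spec : Claim_equal_format_response_html := by
  intro text _
  unfold Spec_format_response_html format_response_html format_response_html_alt
  by_cases h : PySem.Str.isIn "*" text = true
  · rw [if_pos h, if_pos h]
    have hkey := foldl_eq_Rgo ((PySem.Str.split? text "\n").getD []) false []
    simp only [List.nil_append, finalizeA] at hkey
    rw [renderGroups_eq_Rgo, ← hkey]
    show (if (((PySem.Str.split? text "\n").getD []).foldl stepA (false, [])).1 = true
        then PySem.Str.join "\n" ((((PySem.Str.split? text "\n").getD []).foldl stepA (false, [])).2 ++ [ulClose])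
        else PySem.Str.join "\n" (((PySem.Str.split? text "\n").getD []).foldl stepA (false, [])).2) = _
    split_ifs <;> rfl
  · rw [if_neg h, if_neg h]
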